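-- pv_equiv track=rewrite | github.com/HLTCHKUST/MulQG | GPG/models/model_utils.py | words2sents
-- ===== SOURCE A (Python) =====
-- PAD_TOKEN = "<PAD>"
--
-- END_TOKEN = "EOS"
--
-- def words2sents(decoded_words):
--     result = []
--     for w in decoded_words:
--         if w == END_TOKEN:
--             break
--         elif w == PAD_TOKEN:
--             continue
--         result.append(w)
--     return result
-- ===== SOURCE B (Python) =====
-- PAD_TOKEN = "<PAD>"
-- END_TOKEN = "EOS"
--
-- def words2sents(decoded_words):
--     if END_TOKEN in decoded_words:
--         prefix = decoded_words[:decoded_words.index(END_TOKEN)]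
--     else:
--         prefix = decoded_words
--     return [w for w in prefix if w != PAD_TOKEN]
-- ===== Notes on version B (the rewrite author's own statement) =====
-- stated objective: simpler
-- what changed: Replaced the single interleaved loop with break/continue by two stages: find the first EOS with index and slice the prefix, then filter out PAD with a comprehension.
import Mathlib
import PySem

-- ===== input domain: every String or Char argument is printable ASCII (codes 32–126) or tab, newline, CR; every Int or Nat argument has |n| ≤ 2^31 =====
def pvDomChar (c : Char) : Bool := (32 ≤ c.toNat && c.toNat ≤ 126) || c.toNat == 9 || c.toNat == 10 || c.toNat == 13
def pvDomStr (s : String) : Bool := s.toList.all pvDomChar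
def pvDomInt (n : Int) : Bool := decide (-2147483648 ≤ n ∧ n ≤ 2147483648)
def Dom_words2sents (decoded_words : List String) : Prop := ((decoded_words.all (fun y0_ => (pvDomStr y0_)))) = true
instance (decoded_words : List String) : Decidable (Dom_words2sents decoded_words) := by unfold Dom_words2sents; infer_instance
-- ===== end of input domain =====

-- B replaces A's one loop with break/continue by boundary-finding (index + slice) then a filter; objective: simpler.

-- ===== PORT A =====
-- the loop: break at "EOS", skip "<PAD>", append otherwise
def words2sents (decoded_words : List String) : List String :=
  match decoded_words with
  | [] => []
  | w :: ws =>
    if w = "EOS" then []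
    else if w = "<PAD>" then words2sents ws
    else w :: words2sents ws

-- ===== PORT B =====
def words2sents_alt (decoded_words : List String) : List String :=
  let pre :=
    if "EOS" ∈ decoded_words then
      match PySem.List.index? decoded_words "EOS" with
      | some i => PySem.List.slice decoded_words none (some (i : Int))
      | none => decoded_words   -- unreachable given membership
    else decoded_words
  pre.filter (fun w => w ≠ "<PAD>")

-- ===== PRECONDITION & SPEC =====
def Spec_words2sents (decoded_words : List String) (out : List String) : Prop := out = words2sents_alt decoded_words
instance (decoded_words : List String) (out : List String) : Decidable (Spec_words2sents decoded_words out) := by unfold Spec_words2sents; infer_instance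

-- ===== CLAIM (what is proved, stated in full; the proofs are below) =====
def Claim_equal_words2sents : Prop := ∀ (decoded_words : List String), Dom_words2sents decoded_words → Spec_words2sents decoded_words (words2sents decoded_words)

-- ===== LEMMAS AND PROOFS =====

theorem words2sents_alt_eq (decoded_words : List String) :
    words2sents_alt decoded_words = words2sents decoded_words := by
  induction decoded_words with
  | nil => rfl
  | cons w ws ih =>
    by_cases hE : w = "EOS"
    · subst hE
      rw [words2sents_alt]
      rw [if_pos (List.mem_cons_self ..), PySem.List.index?_cons_self]
      dsimp only
      rw [PySem.List.slice_to_natCast]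
      rw [words2sents]
      simp
    · have hidx := PySem.List.index?_cons_of_ne (xs := ws) (x := w) (v := "EOS") hE
      rw [words2sents_alt, words2sents, if_neg hE]
      by_cases hmem : "EOS" ∈ ws
      · cases hi : PySem.List.index? ws "EOS" with
        | none =>
          have := (PySem.List.index?_isSome_iff (xs := ws) (v := "EOS")).mpr hmem
          rw [hi] at this; simp at this
        | some i =>
          rw [hi] at hidx
          simp only [Option.map_some] at hidx
          rw [if_pos (List.mem_cons_of_mem _ hmem), hidx]
          dsimp only
          rw [PySem.List.slice_to_natCast, List.take_succ_cons]
          have hb : words2sents_alt ws = words2sents ws := ih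
          rw [words2sents_alt, if_pos hmem, hi] at hb
          dsimp only at hb
          rw [PySem.List.slice_to_natCast] at hb
          by_cases hP : w = "<PAD>"
          · rw [List.filter_cons_of_neg (by simp [hP]), if_pos hP]; exact hb
          · rw [List.filter_cons_of_pos (by simp [hP]), if_neg hP, hb]
      · rw [if_neg (by
          simp only [List.mem_cons, not_or]
          exact ⟨fun h => hE h.symm, hmem⟩)]
        have hb : words2sents_alt ws = words2sents ws := ih
        rw [words2sents_alt, if_neg hmem] at hb
        by_cases hP : w = "<PAD>"
        · rw [List.filter_cons_of_neg (by simp [hP]), if_pos hP]; exact hb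
        · rw [List.filter_cons_of_pos (by simp [hP]), if_neg hP, hb]
-- ===== VERDICT (by name: the statement is the Claim_ definition above) =====
theorem words2sents_spec : Claim_equal_words2sents := by
  intro dw _
  unfold Spec_words2sents
  exact (words2sents_alt_eq dw).symm
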